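-- pv_equiv track=rewrite | github.com/KrithikK7/Audio_watermarking | Embed/v4.1.py | bits_to_frames
-- ===== SOURCE A (Python) =====
-- from typing import List, Tuple, Optional
--
-- def bits_to_frames(bits: List[int], width: int = 16) -> List[List[int]]:
--     frames = []
--     for i in range(0, len(bits), width):
--         chunk = bits[i:i+width]
--         if len(chunk) < width:
--             chunk += [0] * (width - len(chunk))
--         frames.append(chunk)
--     return frames
-- ===== SOURCE B (Python) =====
-- from typing import List
--
-- def bits_to_frames(bits: List[int], width: int = 16) -> List[List[int]]:
--     frames = []
--     cur = []
--     for b in bits: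
--         cur.append(b)
--         if len(cur) == width:
--             frames.append(cur)
--             cur = []
--     if cur:
--         frames.append(cur + [0] * (width - len(cur)))
--     return frames
-- ===== Notes on version B (the rewrite author's own statement) =====
-- stated objective: alternative
-- what changed: A indexes and slices bits in width-sized jumps, padding each short slice; B never slices: it streams the bits one element at a time into a current-frame accumulator, flushing it whenever it reaches width and padding only the final leftover.
-- outside the precondition, e.g. on bits_to_frames([1], -2): A returns [], B returns [[1]]
import Mathlib
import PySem

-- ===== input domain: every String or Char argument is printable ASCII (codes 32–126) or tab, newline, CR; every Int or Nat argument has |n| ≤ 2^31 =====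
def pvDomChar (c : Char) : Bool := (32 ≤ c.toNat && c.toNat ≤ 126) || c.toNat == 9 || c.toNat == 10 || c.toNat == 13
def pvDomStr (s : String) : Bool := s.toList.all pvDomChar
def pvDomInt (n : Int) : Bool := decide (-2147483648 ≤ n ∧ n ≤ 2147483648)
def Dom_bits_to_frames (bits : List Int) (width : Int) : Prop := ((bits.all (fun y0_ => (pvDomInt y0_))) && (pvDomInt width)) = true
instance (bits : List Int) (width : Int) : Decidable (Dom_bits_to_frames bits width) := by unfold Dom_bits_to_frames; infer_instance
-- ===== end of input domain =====

-- B streams the bits one element at a time into a current-frame accumulator (no slicing or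
-- indexing), flushing whenever it reaches width and padding only the final leftover; equal to A
-- on every positive width (the natural frame-width domain, see Pre_).


-- ===== PORT A =====
def bits_to_frames (bits : List Int) (width : Int) : List (List Int) :=
  (PySem.List.pyRange 0 (bits.length : Int) width).foldl
    (fun frames i =>
      let chunk := PySem.List.slice bits (some i) (some (i + width))
      let chunk := if (chunk.length : Int) < width
        then chunk ++ List.replicate (width - (chunk.length : Int)).toNat 0
        else chunk
      frames ++ [chunk]) []

-- ===== PORT B =====
-- one iteration of B's `for b in bits` loop over the state (frames, cur)
def btfStep (width : Int) (s : List (List Int) × List Int) (b : Int) : List (List Int) × List Int :=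
  let cur := s.2 ++ [b]
  if (cur.length : Int) = width then (s.1 ++ [cur], []) else (s.1, cur)

def bits_to_frames_alt (bits : List Int) (width : Int) : List (List Int) :=
  let s := bits.foldl (btfStep width) ([], [])
  if s.2 ≠ [] then s.1 ++ [s.2 ++ List.replicate (width - (s.2.length : Int)).toNat 0] else s.1

-- ===== PRECONDITION & SPEC =====
-- Pre_ restricts to the natural domain of positive frame widths: at width = 0 A raises
-- ValueError (range step 0), and for width < 0 (a degenerate width no caller would pass)
-- A's empty result is an accident of range's negative-step semantics.
def Pre_bits_to_frames (bits : List Int) (width : Int) : Prop := 0 < width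
instance (bits : List Int) (width : Int) : Decidable (Pre_bits_to_frames bits width) := by unfold Pre_bits_to_frames; infer_instance
def pvWitness_bits_to_frames : List Int × Int := ([1, 0, 1], 2)

def Spec_bits_to_frames (bits : List Int) (width : Int) (out : List (List Int)) : Prop := out = bits_to_frames_alt bits width
instance (bits : List Int) (width : Int) (out : List (List Int)) : Decidable (Spec_bits_to_frames bits width out) := by unfold Spec_bits_to_frames; infer_instance

-- ===== CLAIM (what is proved, stated in full; the proofs are below) =====
def Claim_equal_bits_to_frames : Prop := ∀ (bits : List Int) (width : Int), Dom_bits_to_frames bits width → Pre_bits_to_frames bits width → Spec_bits_to_frames bits width (bits_to_frames bits width)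

-- ===== LEMMAS AND PROOFS =====

-- the frame both programs emit for the (nonempty) suffix that starts a chunk (w > 0)
def firstChunk (w : Nat) (bits : List Int) : List Int :=
  if bits.length < w then bits ++ List.replicate (w - bits.length) 0 else bits.take w

-- A's k-th frame, after normalising the foldl over pyRange to a map over List.range
def fA (w : Nat) (bits : List Int) (k : Nat) : List Int :=
  let chunk := (bits.drop (w*k)).take w
  if (chunk.length : Int) < (w:Int) then chunk ++ List.replicate ((w:Int) - (chunk.length : Int)).toNat 0 else chunk

lemma A_norm (w : Nat) (hw : 0 < w) (bits : List Int) :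
    bits_to_frames bits (w : Int) = (List.range ((bits.length + w - 1)/w)).map (fA w bits) := by
  unfold bits_to_frames
  rw [PySem.List.pyRange_of_pos 0 (bits.length : Int) (by exact_mod_cast hw)]
  rw [PySem.List.foldl_append_singleton_eq_map, List.map_map]
  have hcount : (if (0:Int) < (bits.length:Int) then (((bits.length:Int) - 0 + w - 1) / w).toNat else 0)
      = (bits.length + w - 1)/w := by
    split_ifs with h
    · have h1 : ((bits.length:Int) - 0 + w - 1) = ((bits.length + w - 1 : Nat) : Int) := by omega
      rw [h1]; rfl
    · have h0 : bits.length = 0 := by omega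
      rw [h0, Nat.div_eq_of_lt (by omega)]
  rw [hcount, List.nil_append]
  apply List.map_congr_left
  intro k _
  simp only [Function.comp_apply]
  have hi : ((0:Int) + (w:Int) * (k:Nat)) = ((w*k : Nat) : Int) := by push_cast [Nat.cast_mul]; ring
  rw [hi, PySem.List.slice_natCast_add bits (w*k) w]
  simp only [fA]

lemma A_nil (w : Nat) (hw : 0 < w) : bits_to_frames [] (w : Int) = [] := by
  rw [A_norm w hw []]
  have h0 : (([] : List Int).length + w - 1) / w = 0 := Nat.div_eq_of_lt (by simp; omega)
  rw [h0]
  rfl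

lemma A_cons (w : Nat) (hw : 0 < w) (bits : List Int) (hb : bits ≠ []) :
    bits_to_frames bits (w : Int) = firstChunk w bits :: bits_to_frames (bits.drop w) (w : Int) := by
  have hlen : 0 < bits.length := List.length_pos_of_ne_nil hb
  rw [A_norm w hw bits, A_norm w hw (bits.drop w), List.length_drop]
  have hm : (bits.length + w - 1)/w = (bits.length - w + w - 1)/w + 1 := by
    rcases le_or_gt w bits.length with h | h
    · have he : bits.length + w - 1 = (bits.length - w + w - 1) + w := by omega
      rw [he, Nat.add_div_right _ hw]
    · have h1 : bits.length - w = 0 := by omega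
      rw [h1, Nat.div_eq_of_lt (show 0 + w - 1 < w by omega)]
      exact Nat.div_eq_of_lt_le (k := 1) (n := w) (m := bits.length + w - 1) (by omega) (by omega)
  rw [hm, List.range_succ_eq_map, List.map_cons, List.map_map]
  congr 1
  · -- head frame
    simp only [fA, Nat.mul_zero, List.drop_zero, firstChunk]
    rcases lt_or_ge bits.length w with h | h
    · rw [List.take_of_length_le (by omega)]
      rw [if_pos (by exact_mod_cast h), if_pos h]
      congr 1
      congr 1
      omega
    · have hc : (bits.take w).length = w := by simp; omega
      rw [if_neg (by rw [hc]; exact lt_irrefl _), if_neg (by omega)]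
  · -- tail frames
    apply List.map_congr_left
    intro k _
    simp only [Function.comp_apply, fA]
    have hd : bits.drop (w * Nat.succ k) = (bits.drop w).drop (w * k) := by
      rw [List.drop_drop, Nat.mul_succ, Nat.add_comm]
    rw [hd]

-- B's loop, when the remaining bits cannot fill the current frame: it just accumulates them
lemma go_short (w : Nat) : ∀ (bits : List Int) (frames : List (List Int)) (cur : List Int),
    cur.length + bits.length < w →
    bits.foldl (btfStep (w:Int)) (frames, cur) = (frames, cur ++ bits) := by
  intro bits
  induction bits with
  | nil => intro frames cur _; simp
  | cons b bs ih =>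
    intro frames cur h
    simp only [List.foldl_cons, btfStep]
    rw [if_neg (by simp at h ⊢; omega)]
    rw [ih frames (cur ++ [b]) (by simp at h ⊢; omega)]
    simp

-- B's loop, when the remaining bits complete the current frame after k more elements:
-- it flushes one full frame and continues with an empty accumulator
lemma go_fill (w : Nat) : ∀ (k : Nat) (bits : List Int) (frames : List (List Int)) (cur : List Int),
    0 < k → cur.length + k = w → k ≤ bits.length →
    bits.foldl (btfStep (w:Int)) (frames, cur)
      = (bits.drop k).foldl (btfStep (w:Int)) (frames ++ [cur ++ bits.take k], []) := by
  intro k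
  induction k with
  | zero => intro _ _ _ hk; omega
  | succ k ih =>
    intro bits frames cur _ hsum hle
    cases bits with
    | nil => simp at hle
    | cons b bs =>
      simp only [List.foldl_cons, btfStep]
      by_cases hk0 : k = 0
      · subst hk0
        rw [if_pos (by simp; omega)]
        simp [List.take_succ_cons, List.take_zero]
      · rw [if_neg (by simp; omega)]
        rw [ih bs frames (cur ++ [b]) (by omega) (by simp; omega) (by simp at hle; omega)]
        simp [List.take_succ_cons]

-- the frames accumulator is only appended to: it can be factored out of the loop
lemma go_frames (w : Nat) : ∀ (bits : List Int) (frames : List (List Int)) (cur : List Int),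
    bits.foldl (btfStep (w:Int)) (frames, cur)
      = (frames ++ (bits.foldl (btfStep (w:Int)) ([], cur)).1,
         (bits.foldl (btfStep (w:Int)) ([], cur)).2) := by
  intro bits
  induction bits with
  | nil => intro frames cur; simp
  | cons b bs ih =>
    intro frames cur
    simp only [List.foldl_cons, btfStep]
    split_ifs with h
    · rw [ih (frames ++ [cur ++ [b]]) [], ih ([] ++ [cur ++ [b]]) []]
      simp
    · exact ih frames (cur ++ [b])

lemma B_nil (w : Nat) : bits_to_frames_alt [] (w : Int) = [] := by
  simp [bits_to_frames_alt]

lemma B_cons (w : Nat) (hw : 0 < w) (bits : List Int) (hb : bits ≠ []) :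
    bits_to_frames_alt bits (w : Int) = firstChunk w bits :: bits_to_frames_alt (bits.drop w) (w : Int) := by
  have hlen : 0 < bits.length := List.length_pos_of_ne_nil hb
  rcases lt_or_ge bits.length w with h | h
  · -- short: the whole input ends up in cur and is padded once
    have hdrop : bits.drop w = [] := List.drop_eq_nil_of_le (by omega)
    rw [hdrop, B_nil w]
    simp only [bits_to_frames_alt]
    rw [go_short w bits [] [] (by simpa using h)]
    simp only [List.nil_append]
    rw [if_pos hb]
    unfold firstChunk
    rw [if_pos h]
    congr 3
    omega
  · -- long: the first w elements flush as one full frame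
    simp only [bits_to_frames_alt]
    rw [go_fill w w bits [] [] hw (by simp) h, go_frames w (bits.drop w) ([] ++ [[] ++ bits.take w]) []]
    simp only [List.nil_append]
    have hfc : firstChunk w bits = bits.take w := by unfold firstChunk; rw [if_neg (by omega)]
    rw [hfc]
    split_ifs with h2 <;> simp

lemma main_pos (w : Nat) (hw : 0 < w) (bits : List Int) :
    bits_to_frames bits (w : Int) = bits_to_frames_alt bits (w : Int) := by
  induction hn : bits.length using Nat.strong_induction_on generalizing bits with
  | _ n ih =>
    rcases List.eq_nil_or_concat' bits with rfl | h
    · rw [A_nil w hw, B_nil w]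
    · have hb : bits ≠ [] := by rcases h with ⟨l, x, rfl⟩; simp
      rw [A_cons w hw bits hb, B_cons w hw bits hb]
      congr 1
      have hlen : 0 < bits.length := List.length_pos_of_ne_nil hb
      exact ih (bits.drop w).length (by rw [← hn, List.length_drop]; omega) (bits.drop w) rfl

-- ===== VERDICT (by name: the statement is the Claim_ definition above) =====
theorem bits_to_frames_spec : Claim_equal_bits_to_frames := by
  intro bits width _ hpre
  unfold Spec_bits_to_frames
  have hwn : width = ((width.toNat : Nat) : Int) := by
    unfold Pre_bits_to_frames at hpre; omega
  rw [hwn]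
  exact main_pos width.toNat (by unfold Pre_bits_to_frames at hpre; omega) bits
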